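-- pv_equiv track=rewrite | github.com/Aryan-510/project | app.py | is_trusted_host
-- ===== SOURCE A (Python) =====
-- trusted_domains = [
--     "google.com",
--     "www.google.com",
--     "youtube.com",
--     "github.com",
--     "microsoft.com",
--     "wikipedia.org"
-- ]
--
-- def is_trusted_host(hostname):
--     host = str(hostname or "").lower().strip()
--     if not host:
--         return False
--     for domain in trusted_domains:
--         base = domain.lower().replace("www.", "")
--         if host == base or host.endswith("." + base):
--             return True
--     return False
-- ===== SOURCE B (Python) =====
-- trusted_domains = [
--     "google.com",
--     "www.google.com",
--     "youtube.com",
--     "github.com",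
--     "microsoft.com",
--     "wikipedia.org"
-- ]
--
-- def is_trusted_host(hostname):
--     host = str(hostname or "").lower().strip()
--     if not host:
--         return False
--     bases = {d.lower().replace("www.", "") for d in trusted_domains}
--     if host in bases:
--         return True
--     return any(ch == '.' and host[i+1:] in bases for i, ch in enumerate(host))
-- ===== Notes on version B (the rewrite author's own statement) =====
-- stated objective: idiomatic
-- what changed: B builds the set of normalized trusted bases once and scans the host's own dot positions with set lookups, instead of A's loop over every trusted domain re-normalizing it and calling endswith.
import Mathlib
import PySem

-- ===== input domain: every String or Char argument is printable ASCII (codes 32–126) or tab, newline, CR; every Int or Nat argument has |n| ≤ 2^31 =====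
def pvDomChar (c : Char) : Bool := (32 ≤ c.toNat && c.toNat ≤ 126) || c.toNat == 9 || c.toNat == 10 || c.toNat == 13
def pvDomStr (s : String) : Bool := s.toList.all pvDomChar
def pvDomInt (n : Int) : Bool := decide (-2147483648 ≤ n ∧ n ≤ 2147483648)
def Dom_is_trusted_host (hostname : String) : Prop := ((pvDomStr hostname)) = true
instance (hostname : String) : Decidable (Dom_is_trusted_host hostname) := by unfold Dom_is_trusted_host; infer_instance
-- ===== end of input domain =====

-- B scans the host's own dot positions with set lookups instead of A's per-domain endswith loop (objective: idiomatic).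

-- ===== PORT A =====
def pvTrustedDomains : List String :=
  ["google.com", "www.google.com", "youtube.com", "github.com", "microsoft.com", "wikipedia.org"]

-- the 'for domain in trusted_domains: …' loop, returning early on a match
def pvLoopA (host : String) : List String → Bool
  | [] => false
  | d :: rest =>
    let base := PySem.Str.replace (PySem.Str.lower d) "www." ""
    if host == base || PySem.Str.endswith host ("." ++ base) then true else pvLoopA host rest

def is_trusted_host (hostname : String) : Bool :=
  let host := PySem.Str.strip (PySem.Str.lower (if hostname == "" then "" else hostname))
  if host == "" then false
  else pvLoopA host pvTrustedDomains

-- ===== PORT B =====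
-- bases = {d.lower().replace("www.", "") for d in trusted_domains}
def pvBases : PySem.Set String :=
  PySem.Set.ofList (pvTrustedDomains.map (fun d => PySem.Str.replace (PySem.Str.lower d) "www." ""))

def is_trusted_host_alt (hostname : String) : Bool :=
  let host := PySem.Str.strip (PySem.Str.lower (if hostname == "" then "" else hostname))
  if host == "" then false
  else if PySem.Set.contains pvBases host then true
  else (PySem.List.enumerate host.toList 0).any
        (fun p => p.2 == '.' && PySem.Set.contains pvBases (PySem.Str.slice host (some (p.1 + 1)) none))

-- ===== PRECONDITION & SPEC =====
def Spec_is_trusted_host (hostname : String) (out : Bool) : Prop := out = is_trusted_host_alt hostname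
instance (hostname : String) (out : Bool) : Decidable (Spec_is_trusted_host hostname out) := by unfold Spec_is_trusted_host; infer_instance

-- ===== CLAIM (what is proved, stated in full; the proofs are below) =====
def Claim_equal_is_trusted_host : Prop := ∀ (hostname : String), Dom_is_trusted_host hostname → Spec_is_trusted_host hostname (is_trusted_host hostname)

-- ===== LEMMAS AND PROOFS =====
set_option maxHeartbeats 2000000

-- host endswith "." + b  ↔  some dot position k of host has host[k+1:] = b
lemma dot_suffix_iff (cs : List Char) (b : String) :
    ('.' :: b.toList) <:+ cs ↔
      ∃ k : Nat, k < cs.length ∧ cs.drop k = '.' :: b.toList := by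
  constructor
  · rintro ⟨p, hp⟩
    refine ⟨p.length, ?_, ?_⟩
    · have := congrArg List.length hp; simp at this; omega
    · have : cs.drop p.length = ('.' :: b.toList) := by
        rw [← hp]; simp
      exact this
  · rintro ⟨k, _, hk⟩
    exact ⟨cs.take k, by rw [← hk]; simp⟩


-- evaluation of the six normalized bases (closed literals)
lemma pvBases_eq : pvBases = ["google.com", "youtube.com", "github.com", "microsoft.com", "wikipedia.org"] := by decide

lemma eb1 : PySem.Str.replace (PySem.Str.lower "google.com") "www." "" = "google.com" := by decide
lemma eb2 : PySem.Str.replace (PySem.Str.lower "www.google.com") "www." "" = "google.com" := by decide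
lemma eb3 : PySem.Str.replace (PySem.Str.lower "youtube.com") "www." "" = "youtube.com" := by decide
lemma eb4 : PySem.Str.replace (PySem.Str.lower "github.com") "www." "" = "github.com" := by decide
lemma eb5 : PySem.Str.replace (PySem.Str.lower "microsoft.com") "www." "" = "microsoft.com" := by decide
lemma eb6 : PySem.Str.replace (PySem.Str.lower "wikipedia.org") "www." "" = "wikipedia.org" := by decide

lemma slice_toList (s : String) (k : Nat) :
    (PySem.Str.slice s (some ((k : Int) + 1)) none).toList = s.toList.drop (k + 1) := by
  have h : ((k : Int) + 1) = ((k + 1 : Nat) : Int) := by push_cast; ring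
  simp only [PySem.Str.toList_slice, h, PySem.Chars.slice_eq_listSlice, PySem.List.slice_from_natCast]

lemma esuffix (s b : String) :
    (PySem.Str.endswith s ("." ++ b) = true) ↔ ('.' :: b.toList) <:+ s.toList := by
  rw [show PySem.Str.endswith s ("." ++ b) = PySem.Chars.endswith s.toList ("." ++ b).toList from by simp]
  rw [PySem.Chars.endswith_iff]
  simp

lemma pvIfTrueOr (c r : Bool) : (if c then true else r) = (c || r) := by cases c <;> simp

-- A's early-return loop is List.any of its test
lemma loop_any (host : String) (ds : List String) :
    pvLoopA host ds = ds.any (fun d =>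
      host == PySem.Str.replace (PySem.Str.lower d) "www." "" ||
      PySem.Str.endswith host ("." ++ PySem.Str.replace (PySem.Str.lower d) "www." "")) := by
  induction ds with
  | nil => rfl
  | cons d rest ih =>
    rw [List.any_cons, ← ih]
    simp only [pvLoopA]
    rw [pvIfTrueOr]

-- B's scan over the host's dot positions finds exactly the bases that are dot-suffixes of the host
lemma any_side (host : String) (L : List String) :
    ((PySem.List.enumerate host.toList 0).any (fun p =>
        p.2 == '.' && PySem.Set.contains L (PySem.Str.slice host (some (p.1 + 1)) none)) = true)
      ↔ ∃ b ∈ L, ('.' :: b.toList) <:+ host.toList := by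
  rw [List.any_eq_true]
  constructor
  · rintro ⟨p, hp, hf⟩
    obtain ⟨k, hk, rfl⟩ := (PySem.List.mem_enumerate_iff _ _ _).mp hp
    simp only [zero_add, Bool.and_eq_true, beq_iff_eq] at hf
    obtain ⟨hdot, hc⟩ := hf
    refine ⟨_, (PySem.Set.contains_iff _ _).mp hc, ?_⟩
    rw [slice_toList host k]
    have hdrop : host.toList.drop k = '.' :: host.toList.drop (k + 1) := by
      rw [List.drop_eq_getElem_cons hk, hdot]
    rw [← hdrop]
    exact List.drop_suffix k _
  · rintro ⟨b, hbL, hsuf⟩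
    obtain ⟨k, hk, hdrop⟩ := (dot_suffix_iff _ _).mp hsuf
    have hcons : host.toList[k] :: host.toList.drop (k + 1) = '.' :: b.toList := by
      rw [← List.drop_eq_getElem_cons hk, hdrop]
    obtain ⟨h1, h2⟩ := List.cons.inj hcons
    refine ⟨((0 : Int) + (k : Int), host.toList[k]), (PySem.List.mem_enumerate_iff _ _ _).mpr ⟨k, hk, rfl⟩, ?_⟩
    simp only [zero_add, Bool.and_eq_true, beq_iff_eq]
    refine ⟨h1, (PySem.Set.contains_iff _ _).mpr ?_⟩
    have : PySem.Str.slice host (some ((k : Int) + 1)) none = b :=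
      String.toList_inj.mp ((slice_toList host k).trans h2)
    rw [this]; exact hbL

-- propositional reshuffle between A's per-domain disjunction and B's (membership ∨ dot-scan) split
lemma pvShuffle (a1 a2 a3 a4 a5 s1 s2 s3 s4 s5 : Prop) :
    ((a1 ∨ s1) ∨ (a1 ∨ s1) ∨ (a2 ∨ s2) ∨ (a3 ∨ s3) ∨ (a4 ∨ s4) ∨ a5 ∨ s5) ↔
      ((a1 ∨ a2 ∨ a3 ∨ a4 ∨ a5) ∨ s1 ∨ s2 ∨ s3 ∨ s4 ∨ s5) := by tauto

lemma main_lemma (host : String) :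
    pvLoopA host pvTrustedDomains =
      (PySem.Set.contains pvBases host ||
        (PySem.List.enumerate host.toList 0).any
          (fun p => p.2 == '.' && PySem.Set.contains pvBases (PySem.Str.slice host (some (p.1 + 1)) none))) := by
  rw [Bool.eq_iff_iff]
  rw [loop_any, pvBases_eq]
  simp only [pvTrustedDomains, List.any_cons, List.any_nil, eb1, eb2, eb3, eb4, eb5, eb6]
  simp only [Bool.or_eq_true, beq_iff_eq, esuffix, any_side,
    PySem.Set.contains_iff, List.mem_cons, List.not_mem_nil, or_false, exists_eq_or_imp,
    exists_eq_left, Bool.false_eq_true]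
  exact pvShuffle _ _ _ _ _ _ _ _ _ _

-- ===== VERDICT (by name: the statement is the Claim_ definition above) =====
theorem is_trusted_host_spec : Claim_equal_is_trusted_host := by
  intro hostname _
  unfold Spec_is_trusted_host is_trusted_host is_trusted_host_alt
  set host := PySem.Str.strip (PySem.Str.lower (if hostname == "" then "" else hostname)) with hh
  by_cases h : host == ""
  · simp [h]
  · simp only [h, if_false, Bool.false_eq_true, main_lemma host]
    cases PySem.Set.contains pvBases host <;> simp
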